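-- pv_equiv track=rewrite | github.com/oceanusXXD/code2skill | src/code2skill/core.py | _derive_cluster_name
-- ===== SOURCE A (Python) =====
-- from collections import Counter
--
-- def _derive_cluster_name(files: list[str], index: int) -> str:
--     if not files:
--         return f"cluster-{index}"
--
--     split_parents = [path.split("/")[:-1] for path in files]
--     common_parts: list[str] = []
--     for parts in zip(*split_parents):
--         if len(set(parts)) != 1:
--             break
--         common_parts.append(parts[0])
--     if common_parts:
--         return "/".join(common_parts)
--
--     parent_counts = Counter(
--         "/".join(path.split("/")[:-1]) or "."
--         for path in files
--     )
--     top_parent, _ = parent_counts.most_common(1)[0]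
--     if top_parent != ".":
--         return top_parent
--     return f"cluster-{index}"
-- ===== SOURCE B (Python) =====
-- def _derive_cluster_name(files: list[str], index: int) -> str:
--     if not files:
--         return f"cluster-{index}"
--
--     split_parents = [path.split("/")[:-1] for path in files]
--
--     # row-wise fold: truncate the candidate prefix at the first difference
--     common = list(split_parents[0])
--     for parts in split_parents[1:]:
--         k = 0
--         while k < len(common) and k < len(parts) and common[k] == parts[k]:
--             k += 1
--         del common[k:]
--     if common:
--         return "/".join(common)
--
--     counts: dict[str, int] = {}
--     for parts in split_parents:
--         parent = "/".join(parts) or "."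
--         counts[parent] = counts.get(parent, 0) + 1
--     top = max(counts.items(), key=lambda kv: kv[1])[0]
--     if top != ".":
--         return top
--     return f"cluster-{index}"
-- ===== Notes on version B (the rewrite author's own statement) =====
-- stated objective: alternative
-- what changed: The common-prefix phase is computed by a row-major fold that truncates a candidate prefix at the first difference with each subsequent parts list, instead of A's column-major zip-transpose scan with a set-uniformity test per column; the fallback counts parents with a plain dict+max loop instead of Counter.most_common.
import Mathlib
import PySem

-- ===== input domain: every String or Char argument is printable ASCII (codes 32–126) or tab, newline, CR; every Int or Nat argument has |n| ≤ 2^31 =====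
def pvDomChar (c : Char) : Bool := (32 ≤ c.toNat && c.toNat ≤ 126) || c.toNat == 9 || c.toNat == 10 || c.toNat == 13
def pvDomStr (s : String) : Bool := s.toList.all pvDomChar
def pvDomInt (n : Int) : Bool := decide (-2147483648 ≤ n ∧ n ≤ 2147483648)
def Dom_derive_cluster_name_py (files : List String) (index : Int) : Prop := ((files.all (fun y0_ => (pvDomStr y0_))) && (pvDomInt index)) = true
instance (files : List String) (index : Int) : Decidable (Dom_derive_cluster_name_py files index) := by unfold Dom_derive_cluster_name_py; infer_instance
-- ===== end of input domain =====

-- B replaces A's column-major zip-transpose common-prefix scan by a row-major fold that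
-- truncates a candidate prefix at the first difference (objective: alternative, same cost).

-- ===== PORT A =====

-- zip(*split_parents): the columns of the transpose, stopping at the shortest row
def pvZipCols (ls : List (List String)) : List (List String) :=
  match ls with
  | [] => []
  | l :: rest =>
    if (l :: rest).any (fun x => x.isEmpty) then []
    else ((l :: rest).map (fun x => x.headD "")) :: pvZipCols ((l :: rest).map (fun x => x.tail))
termination_by (ls.headD []).length
decreasing_by
  simp_all
  cases l with
  | nil => simp_all
  | cons a as => simp

-- the 'for parts in zip(...): if len(set(parts)) != 1: break; common_parts.append(parts[0])' loop
def pvPrefLoop : List (List String) → List String → List String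
  | [], acc => acc
  | parts :: rest, acc =>
    if PySem.Set.len (PySem.Set.ofList parts) ≠ 1 then acc
    else pvPrefLoop rest (acc ++ [parts.headD ""])

def derive_cluster_name_py (files : List String) (index : Int) : String :=
  if files = [] then "cluster-" ++ PySem.Int.toStr index
  else
    let split_parents := files.map (fun p => PySem.List.slice ((PySem.Str.split? p "/").getD []) none (some (-1)))
    let common_parts := pvPrefLoop (pvZipCols split_parents) []
    if common_parts ≠ [] then PySem.Str.join "/" common_parts
    else
      let parent_counts := PySem.Dict.counter (files.map (fun p =>
        let s := PySem.Str.join "/" (PySem.List.slice ((PySem.Str.split? p "/").getD []) none (some (-1)))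
        if s = "" then "." else s))
      -- most_common(1)[0]: the first key reaching the maximal count (files ≠ [], so the getD default is never used)
      let top := ((PySem.List.max? parent_counts.items (fun kv => kv.2)).getD ("", 0)).1
      if top ≠ "." then top else "cluster-" ++ PySem.Int.toStr index

-- ===== PORT B =====

-- truncate the candidate prefix at the first index where the two lists differ (B's while/del loop)
def pvCp : List String → List String → List String
  | a :: as, b :: bs => if a = b then a :: pvCp as bs else []
  | _, _ => []

def derive_cluster_name_py_alt (files : List String) (index : Int) : String :=
  if files = [] then "cluster-" ++ PySem.Int.toStr index
  else
    let split_parents := files.map (fun p => PySem.List.slice ((PySem.Str.split? p "/").getD []) none (some (-1)))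
    let common := split_parents.tail.foldl pvCp (split_parents.headD [])
    if common ≠ [] then PySem.Str.join "/" common
    else
      let counts := split_parents.foldl (fun d parts =>
        let s := PySem.Str.join "/" parts
        let parent := if s = "" then "." else s
        d.insert parent (d.getD parent 0 + 1)) (PySem.Dict.empty : PySem.Dict String Int)
      let top := ((PySem.List.max? counts.items (fun kv => kv.2)).getD ("", 0)).1
      if top ≠ "." then top else "cluster-" ++ PySem.Int.toStr index

-- ===== PRECONDITION & SPEC =====
def Spec_derive_cluster_name_py (files : List String) (index : Int) (out : String) : Prop := out = derive_cluster_name_py_alt files index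
instance (files : List String) (index : Int) (out : String) : Decidable (Spec_derive_cluster_name_py files index out) := by unfold Spec_derive_cluster_name_py; infer_instance

-- ===== CLAIM (what is proved, stated in full; the proofs are below) =====
def Claim_equal_derive_cluster_name_py : Prop := ∀ (files : List String) (index : Int), Dom_derive_cluster_name_py files index → Spec_derive_cluster_name_py files index (derive_cluster_name_py files index)

-- ===== LEMMAS AND PROOFS =====

theorem pvCp_cons (a b : String) (as bs : List String) :
    pvCp (a :: as) (b :: bs) = if a = b then a :: pvCp as bs else [] := rfl

theorem pvCp_nil_right (a : List String) : pvCp a [] = [] := by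
  cases a <;> rfl

theorem foldl_pvCp_nil (rest : List (List String)) : rest.foldl pvCp [] = [] := by
  induction rest with
  | nil => rfl
  | cons r rs ih => simpa [pvCp] using ih

theorem foldl_pvCp_of_nil_mem (rest : List (List String)) (c : List String)
    (h : [] ∈ rest) : rest.foldl pvCp c = [] := by
  induction rest generalizing c with
  | nil => simp at h
  | cons r rs ih =>
    rcases List.mem_cons.mp h with h | h
    · subst h; simp [pvCp_nil_right, foldl_pvCp_nil]
    · exact ih _ h

theorem pvPrefLoop_acc (cols : List (List String)) (acc : List String) :
    pvPrefLoop cols acc = acc ++ pvPrefLoop cols [] := by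
  induction cols generalizing acc with
  | nil => simp [pvPrefLoop]
  | cons parts rest ih =>
    simp only [pvPrefLoop]
    split_ifs with h
    · simp
    · rw [ih, ih ([] ++ [parts.headD ""])]
      simp

-- len(set(x :: xs)) == 1 ↔ every element of xs equals x
theorem setLen_one_iff (x : String) (xs : List String) :
    PySem.Set.len (PySem.Set.ofList (x :: xs)) = 1 ↔ ∀ y ∈ xs, y = x := by
  have hl : PySem.Set.len (PySem.Set.ofList (x :: xs)) = ((PySem.List.dedup (x :: xs)).length : Int) := rfl
  rw [hl]
  have hmem : ∀ y, y ∈ PySem.List.dedup (x :: xs) ↔ y ∈ x :: xs :=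
    fun y => PySem.List.mem_dedup (x :: xs) y
  have hnd := PySem.List.nodup_dedup (x :: xs)
  constructor
  · intro h y hy
    have hlen : (PySem.List.dedup (x :: xs)).length = 1 := by exact_mod_cast h
    obtain ⟨z, hz⟩ := List.length_eq_one_iff.mp hlen
    have hx : x ∈ PySem.List.dedup (x :: xs) := (hmem x).mpr (List.mem_cons_self ..)
    rw [hz] at hx
    have hy2 : y ∈ PySem.List.dedup (x :: xs) := (hmem y).mpr (List.mem_cons_of_mem _ hy)
    rw [hz] at hy2
    exact (List.mem_singleton.mp hy2).trans (List.mem_singleton.mp hx).symm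
  · intro h
    have hd1 : PySem.List.dedup (x :: xs) = [x] := by
      cases hd : PySem.List.dedup (x :: xs) with
      | nil =>
        have hx : x ∈ PySem.List.dedup (x :: xs) := (hmem x).mpr (List.mem_cons_self ..)
        rw [hd] at hx
        exact absurd hx (List.not_mem_nil)
      | cons z t =>
        have hz : z = x := by
          have hzm : z ∈ PySem.List.dedup (x :: xs) := by rw [hd]; exact List.mem_cons_self ..
          rcases List.mem_cons.mp ((hmem z).mp hzm) with h2 | h2
          · exact h2
          · exact h z h2
        cases t with
        | nil => simp [hz]
        | cons w t2 =>
          have hw : w = x := by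
            have hwm : w ∈ PySem.List.dedup (x :: xs) := by
              rw [hd]; exact List.mem_cons_of_mem _ (List.mem_cons_self ..)
            rcases List.mem_cons.mp ((hmem w).mp hwm) with h2 | h2
            · exact h2
            · exact h w h2
          have hnin : z ∉ w :: t2 := by rw [hd] at hnd; exact (List.nodup_cons.mp hnd).1
          exact absurd (by simp [hz, hw]) hnin
    have h2 : (PySem.List.dedup (x :: xs)).length = 1 := by rw [hd1]; rfl
    exact_mod_cast h2

theorem foldl_pvCp_cons (a : String) (c : List String) (rest : List (List String))
    (h : ∀ r ∈ rest, r ≠ [] ∧ r.headD "" = a) :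
    rest.foldl pvCp (a :: c) = a :: (rest.map (fun r => r.tail)).foldl pvCp c := by
  induction rest generalizing c with
  | nil => simp
  | cons r rs ih =>
    obtain ⟨hne, hhd⟩ := h r (by simp)
    cases r with
    | nil => exact absurd rfl hne
    | cons b t =>
      have hb : a = b := by simpa using hhd.symm
      subst hb
      simp only [List.foldl_cons, List.map_cons, List.tail_cons]
      rw [pvCp_cons, if_pos rfl]
      exact ih _ (fun r hr => h r (by simp [hr]))

theorem foldl_pvCp_break (a : String) (c : List String) (rest : List (List String))
    (hne : ∀ r ∈ rest, r ≠ [])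
    (h : ∃ r ∈ rest, r.headD "" ≠ a) :
    rest.foldl pvCp (a :: c) = [] := by
  induction rest generalizing c with
  | nil => simp at h
  | cons r rs ih =>
    cases r with
    | nil => exact absurd rfl (hne [] (by simp))
    | cons b t =>
      by_cases hb : a = b
      · subst hb
        simp only [List.foldl_cons]
        rw [pvCp_cons, if_pos rfl]
        refine ih _ (fun r hr => hne r (by simp [hr])) ?_
        rcases h with ⟨r, hr, hrd⟩
        rcases List.mem_cons.mp hr with h1 | h1
        · exact absurd (by simp [h1]) hrd
        · exact ⟨r, h1, hrd⟩
      · simp only [List.foldl_cons]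
        rw [pvCp_cons, if_neg hb]
        exact foldl_pvCp_nil rs

-- the central equivalence: A's column scan equals B's row-wise prefix fold
theorem pref_main (l : List String) (rest : List (List String)) :
    pvPrefLoop (pvZipCols (l :: rest)) [] = rest.foldl pvCp l := by
  induction l generalizing rest with
  | nil =>
    rw [pvZipCols, if_pos (List.any_eq_true.mpr ⟨[], List.mem_cons_self .., rfl⟩)]
    simp [pvPrefLoop, foldl_pvCp_nil]
  | cons a as ih =>
    rw [pvZipCols]
    by_cases hemp : [] ∈ rest
    · rw [if_pos (List.any_eq_true.mpr ⟨[], List.mem_cons_of_mem _ hemp, rfl⟩)]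
      simp [pvPrefLoop, foldl_pvCp_of_nil_mem rest _ hemp]
    · have hnonemp : ∀ r ∈ rest, r ≠ [] := fun r hr h => hemp (h ▸ hr)
      have hc : ¬ ((((a :: as) :: rest).any fun x => x.isEmpty) = true) := by
        simp only [List.any_eq_true, not_exists]
        intro r
        rintro ⟨hr, hre⟩
        rcases List.mem_cons.mp hr with h1 | h1
        · simp [h1] at hre
        · exact hnonemp r h1 (by simpa [List.isEmpty_iff] using hre)
      rw [if_neg hc]
      simp only [List.map_cons, List.headD_cons, List.tail_cons]
      rw [show pvPrefLoop ((a :: rest.map (fun x => x.headD "")) :: pvZipCols (as :: rest.map (fun x => x.tail))) []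
            = if PySem.Set.len (PySem.Set.ofList (a :: rest.map (fun x => x.headD ""))) ≠ 1 then []
              else pvPrefLoop (pvZipCols (as :: rest.map (fun x => x.tail))) ([] ++ [a]) from rfl]
      by_cases hall : ∀ y ∈ rest.map (fun x => x.headD ""), y = a
      · have hset := (setLen_one_iff _ _).mpr hall
        rw [if_neg (not_not_intro hset)]
        rw [List.nil_append, pvPrefLoop_acc, ih]
        rw [foldl_pvCp_cons a as rest
          (fun r hr => ⟨hnonemp r hr, hall _ (List.mem_map_of_mem hr)⟩)]
        rfl
      · have hset : PySem.Set.len (PySem.Set.ofList (a :: rest.map (fun x => x.headD ""))) ≠ 1 := by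
          intro h2; exact hall ((setLen_one_iff _ _).mp h2)
        rw [if_pos hset]
        rw [not_forall] at hall
        obtain ⟨y, hy2⟩ := hall
        rw [Classical.not_imp] at hy2
        obtain ⟨hy, hya⟩ := hy2
        obtain ⟨r, hr, hry⟩ := List.mem_map.mp hy
        exact (foldl_pvCp_break a as rest hnonemp ⟨r, hr, by rw [hry]; exact hya⟩).symm

-- the two fallback Counter builds coincide
theorem counts_eq (l : List (List String)) :
    l.foldl (fun d parts =>
      d.insert (if PySem.Str.join "/" parts = "" then "." else PySem.Str.join "/" parts)
        ((d.getD (if PySem.Str.join "/" parts = "" then "." else PySem.Str.join "/" parts) 0) + 1))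
      PySem.Dict.empty
    = PySem.Dict.counter (l.map (fun parts => if PySem.Str.join "/" parts = "" then "." else PySem.Str.join "/" parts)) := by
  rw [← PySem.Dict.foldl_insert_getD_add_one_eq_counter, List.foldl_map]

-- ===== VERDICT (by name: the statement is the Claim_ definition above) =====
theorem derive_cluster_name_py_spec : Claim_equal_derive_cluster_name_py := by
  intro files index _
  unfold Spec_derive_cluster_name_py
  cases files with
  | nil => rfl
  | cons f fs =>
    simp only [derive_cluster_name_py, derive_cluster_name_py_alt, List.map_cons,
      List.tail_cons, List.headD_cons, if_false, List.cons_ne_nil]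
    rw [pref_main]
    congr 1
    rw [counts_eq]
    simp only [List.map_cons, List.map_map, Function.comp_def]
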